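-- pv_equiv track=rewrite | github.com/ICAMS/python-ace | src/pyace/multispecies_basisextension.py | generate_embeddings_ext
-- ===== SOURCE A (Python) =====
-- ALL = "ALL"
--
-- UNARY = "UNARY"
--
-- def generate_embeddings_ext(potential_config):
--     elements = potential_config["elements"]
--     elements = sorted(elements)
--
--     embeddings = potential_config["embeddings"].copy()
--     embeddings_ext = {(el,): {} for el in elements}
--     # ALL and UNARY behave identically
--     if ALL in embeddings:
--         for el in elements:
--             embeddings_ext[(el,)].update(embeddings[ALL])
--     if UNARY in embeddings:
--         for el in elements:
--             embeddings_ext[(el,)].update(embeddings[UNARY])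
--     for el, val in embeddings.items():
--         if el in elements:
--             embeddings_ext[(el,)].update(val)
--         elif el not in [ALL, UNARY]:
--             raise ValueError(f"{el} is not in specified elements: {elements}")
--
--     # drop all keys, that has no specifications
--     embeddings_ext = {k: v for k, v in embeddings_ext.items() if len(v) > 0}
--     return embeddings_ext
-- ===== SOURCE B (Python) =====
-- ALL = "ALL"
--
-- UNARY = "UNARY"
--
-- def generate_embeddings_ext(potential_config):
--     elements = sorted(potential_config["elements"])
--     embeddings = potential_config["embeddings"]
--     for el in embeddings:
--         if el not in elements and el not in (ALL, UNARY):
--             raise ValueError(f"{el} is not in specified elements: {elements}")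
--     result = {}
--     for el in elements:
--         spec = {}
--         spec.update(embeddings.get(ALL, {}))
--         spec.update(embeddings.get(UNARY, {}))
--         spec.update(embeddings.get(el, {}))
--         if spec:
--             result[(el,)] = spec
--     return result
-- ===== Notes on version B (the rewrite author's own statement) =====
-- stated objective: simpler
-- what changed: A's three separate sweeps (an element loop for ALL, another for UNARY, plus a loop over embeddings.items with interleaved validation, then a final non-empty filter pass) are replaced by one loop over the sorted elements that builds each element's spec directly from embeddings.get(ALL/UNARY/el) and appends it only if non-empty, with validation done in a separate up-front pass.
import Mathlib
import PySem

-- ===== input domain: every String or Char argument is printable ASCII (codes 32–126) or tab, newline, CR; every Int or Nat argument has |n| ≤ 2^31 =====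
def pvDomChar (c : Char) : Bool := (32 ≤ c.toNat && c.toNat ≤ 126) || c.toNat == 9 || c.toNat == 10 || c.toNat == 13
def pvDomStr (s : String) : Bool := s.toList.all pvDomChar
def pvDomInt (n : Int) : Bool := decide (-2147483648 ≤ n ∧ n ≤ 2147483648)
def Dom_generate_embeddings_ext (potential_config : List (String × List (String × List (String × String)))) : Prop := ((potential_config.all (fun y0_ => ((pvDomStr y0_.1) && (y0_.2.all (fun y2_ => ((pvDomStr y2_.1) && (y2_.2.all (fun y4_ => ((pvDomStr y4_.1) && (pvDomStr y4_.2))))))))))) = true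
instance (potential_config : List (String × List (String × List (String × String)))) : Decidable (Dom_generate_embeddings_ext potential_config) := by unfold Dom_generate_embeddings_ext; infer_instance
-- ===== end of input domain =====

-- B replaces A's three separate sweeps over the elements/items by one pass that builds each
-- element's spec directly (ALL, then UNARY, then own entry) plus a separate validation pass;
-- objective: simpler decomposition, same values.

-- ===== PORT A =====
-- potential_config is a Python dict str -> dict str -> dict str str, modelled as nested
-- association lists; PySem.Dict.ofList gives Python's dict-construction semantics.
def generate_embeddings_ext (potential_config : List (String × List (String × List (String × String)))) : List (List String × List (String × String)) :=
  let pcd := PySem.Dict.ofList potential_config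
  -- elements = sorted(potential_config["elements"]) : sorted keys (KeyError excluded by Pre_)
  let elements := PySem.List.sorted (PySem.Dict.keys (PySem.Dict.ofList (pcd.getD "elements" []))) (fun x => x) false
  let embeddings := PySem.Dict.ofList (pcd.getD "embeddings" [])
  -- embeddings_ext = {(el,): {} for el in elements}
  let ext0 : PySem.Dict (List String) (PySem.Dict String String) :=
    elements.foldl (fun d el => d.insert [el] PySem.Dict.empty) PySem.Dict.empty
  -- if ALL in embeddings: for el in elements: embeddings_ext[(el,)].update(embeddings[ALL])
  let ext1 := if embeddings.contains "ALL"
    then elements.foldl (fun d el => d.modify [el] PySem.Dict.empty (fun v => v.update (embeddings.getD "ALL" []))) ext0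
    else ext0
  -- if UNARY in embeddings: likewise
  let ext2 := if embeddings.contains "UNARY"
    then elements.foldl (fun d el => d.modify [el] PySem.Dict.empty (fun v => v.update (embeddings.getD "UNARY" []))) ext1
    else ext1
  -- for el, val in embeddings.items(): …  (the 'elif … raise ValueError' branch is excluded by Pre_)
  let ext3 := embeddings.items.foldl (fun d kv =>
    if kv.1 ∈ elements then d.modify [kv.1] PySem.Dict.empty (fun v => v.update kv.2) else d) ext2
  -- {k: v for k, v in embeddings_ext.items() if len(v) > 0}
  (ext3.items.filter (fun kv => 0 < kv.2.size)).map (fun kv => (kv.1, kv.2.items))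

-- ===== PORT B =====
def generate_embeddings_ext_alt (potential_config : List (String × List (String × List (String × String)))) : List (List String × List (String × String)) :=
  let pcd := PySem.Dict.ofList potential_config
  let elements := PySem.List.sorted (PySem.Dict.keys (PySem.Dict.ofList (pcd.getD "elements" []))) (fun x => x) false
  let embeddings := PySem.Dict.ofList (pcd.getD "embeddings" [])
  -- the validation pass only raises ValueError (excluded by Pre_); it has no other effect
  -- result: one loop over the sorted elements, building each spec directly
  elements.foldl (fun acc el =>
    let spec := ((PySem.Dict.empty.update (embeddings.getD "ALL" [])).update
        (embeddings.getD "UNARY" [])).update (embeddings.getD el [])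
    if 0 < spec.size then acc ++ [([el], spec.items)] else acc) []

-- ===== PRECONDITION & SPEC =====
-- Pre_ excludes exactly the inputs where Python A raises: a missing "elements"/"embeddings"
-- key (KeyError) and an embeddings key that is neither an element nor ALL/UNARY (ValueError).
def Pre_generate_embeddings_ext (potential_config : List (String × List (String × List (String × String)))) : Prop :=
  "elements" ∈ (PySem.Dict.ofList potential_config).keys ∧
  "embeddings" ∈ (PySem.Dict.ofList potential_config).keys ∧
  ∀ k ∈ (PySem.Dict.ofList ((PySem.Dict.ofList potential_config).getD "embeddings" [])).keys,
    k = "ALL" ∨ k = "UNARY" ∨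
      k ∈ (PySem.Dict.ofList ((PySem.Dict.ofList potential_config).getD "elements" [])).keys
instance (potential_config : List (String × List (String × List (String × String)))) : Decidable (Pre_generate_embeddings_ext potential_config) := by unfold Pre_generate_embeddings_ext; infer_instance

def pvWitness_generate_embeddings_ext : (List (String × List (String × List (String × String)))) :=
  [("elements", [("A", []), ("B", [])]), ("embeddings", [("ALL", [("npot", "FinnisSinclair")]), ("A", [("fs_parameters", "1")])])]

def Spec_generate_embeddings_ext (potential_config : List (String × List (String × List (String × String)))) (out : List (List String × List (String × String))) : Prop := out = generate_embeddings_ext_alt potential_config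
instance (potential_config : List (String × List (String × List (String × String)))) (out : List (List String × List (String × String))) : Decidable (Spec_generate_embeddings_ext potential_config out) := by unfold Spec_generate_embeddings_ext; infer_instance

-- ===== CLAIM (what is proved, stated in full; the proofs are below) =====
def Claim_equal_generate_embeddings_ext : Prop := ∀ (potential_config : List (String × List (String × List (String × String)))), Dom_generate_embeddings_ext potential_config → Pre_generate_embeddings_ext potential_config → Spec_generate_embeddings_ext potential_config (generate_embeddings_ext potential_config)

-- ===== LEMMAS AND PROOFS =====

-- fold of modify at keys [e], e not hit: getD unchanged
theorem gee_foldl_modify_getD_notmem (E : List String) (el : String)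
    (d : PySem.Dict (List String) (PySem.Dict String String)) (d0 : PySem.Dict String String)
    (g : String → PySem.Dict String String → PySem.Dict String String) (h : el ∉ E) :
    (E.foldl (fun d e => d.modify [e] d0 (g e)) d).getD [el] d0 = d.getD [el] d0 := by
  induction E generalizing d with
  | nil => rfl
  | cons e E ih =>
    simp only [List.foldl_cons]
    rw [ih _ (fun hm => h (List.mem_cons_of_mem _ hm))]
    rw [PySem.Dict.getD_modify, if_neg (show ¬([el] = [e]) by simp; intro hh; exact h (hh ▸ List.mem_cons_self))]

-- fold of modify at keys [e], e hit once (Nodup): getD gets g el applied once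
theorem gee_foldl_modify_getD_mem (E : List String) (el : String)
    (d : PySem.Dict (List String) (PySem.Dict String String)) (d0 : PySem.Dict String String)
    (g : String → PySem.Dict String String → PySem.Dict String String)
    (hm : el ∈ E) (hnd : E.Nodup) :
    (E.foldl (fun d e => d.modify [e] d0 (g e)) d).getD [el] d0 = g el (d.getD [el] d0) := by
  induction E generalizing d with
  | nil => cases hm
  | cons e E ih =>
    simp only [List.foldl_cons]
    rcases List.mem_cons.mp hm with h | h
    · subst h
      rw [gee_foldl_modify_getD_notmem _ _ _ _ _ (List.nodup_cons.mp hnd).1]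
      rw [PySem.Dict.getD_modify, if_pos rfl]
    · rw [ih _ h (List.nodup_cons.mp hnd).2]
      have hne : el ≠ e := fun hh => (List.nodup_cons.mp hnd).1 (hh ▸ h)
      rw [PySem.Dict.getD_modify, if_neg (show ¬([el] = [e]) by simp [hne])]

-- the items loop, seen from one element key: it folds update over the items with that key
theorem gee_items_foldl_getD (l : List (String × List (String × String))) (E : List String) (el : String)
    (d : PySem.Dict (List String) (PySem.Dict String String)) (d0 : PySem.Dict String String)
    (hm : el ∈ E) :
    (l.foldl (fun d kv => if kv.1 ∈ E then d.modify [kv.1] d0 (fun v => v.update kv.2) else d) d).getD [el] d0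
      = (l.filter (fun kv => kv.1 == el)).foldl (fun v kv => v.update kv.2) (d.getD [el] d0) := by
  induction l generalizing d with
  | nil => rfl
  | cons kv l ih =>
    simp only [List.foldl_cons]
    by_cases hk : kv.1 = el
    · rw [List.filter_cons_of_pos (by simp [hk])]
      rw [if_pos (hk ▸ hm)]
      rw [ih _]
      rw [hk, PySem.Dict.getD_modify, if_pos rfl]
      rfl
    · rw [List.filter_cons_of_neg (by simp [hk])]
      by_cases hE : kv.1 ∈ E
      · rw [if_pos hE, ih _]
        rw [PySem.Dict.getD_modify, if_neg (show ¬([el] = [kv.1]) by simp; intro hh; exact hk hh.symm)]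
      · rw [if_neg hE, ih _]

-- with unique first components, filtering by one key keeps exactly its pair
theorem gee_filter_key_of_nodup (l : List (String × List (String × String))) (el : String)
    (v : List (String × String)) (hnd : (l.map Prod.fst).Nodup) (hv : (el, v) ∈ l) :
    l.filter (fun kv => kv.1 == el) = [(el, v)] := by
  induction l with
  | nil => cases hv
  | cons kv l ih =>
    simp only [List.map_cons, List.nodup_cons] at hnd
    rcases List.mem_cons.mp hv with h | h
    · subst h
      rw [List.filter_cons_of_pos (by simp)]
      have : l.filter (fun kv => kv.1 == el) = [] := by
        apply List.filter_eq_nil_iff.mpr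
        intro a ha
        simp only [beq_iff_eq]
        intro hh
        apply hnd.1
        rw [← hh]
        exact List.mem_map.mpr ⟨a, ha, rfl⟩
      rw [this]
    · have hne : kv.1 ≠ el := fun hh => hnd.1 (by
        have : el ∈ l.map Prod.fst := by exact (List.mem_map_of_mem (f := Prod.fst) h)
        exact hh ▸ this)
      rw [List.filter_cons_of_neg (by simp [hne]), ih hnd.2 h]

-- filter-fold over a dict's items at one key = a single update with getD of that key
theorem gee_filterfold_eq_update (emb : PySem.Dict String (List (String × String)))
    (el : String) (x : PySem.Dict String String)
    (hnd : emb.keys.Nodup) :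
    (emb.items.filter (fun kv => kv.1 == el)).foldl
        (fun (v : PySem.Dict String String) kv => v.update kv.2) x
      = x.update (emb.getD el []) := by
  by_cases hc : emb.contains el = true
  · have hget : ∃ v, emb.get? el = some v := by
      rw [PySem.Dict.contains_eq_isSome_get?] at hc
      exact Option.isSome_iff_exists.mp hc
    obtain ⟨v, hvv⟩ := hget
    have hmem : (el, v) ∈ emb.items := PySem.Dict.mem_items_of_get?_eq_some _ hvv
    rw [gee_filter_key_of_nodup _ _ _ hnd hmem]
    rw [PySem.Dict.getD_of_get?_eq_some _ _ hvv]
    rfl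
  · have hfil : emb.items.filter (fun kv => kv.1 == el) = [] := by
      apply List.filter_eq_nil_iff.mpr
      intro a ha
      simp only [beq_iff_eq]
      intro hh
      have : el ∈ emb.keys := hh ▸ PySem.Dict.mem_keys_of_mem_items _ ha
      rw [← PySem.Dict.contains_iff_mem_keys _ _] at this
      simp [this] at hc
    rw [hfil]
    rw [PySem.Dict.getD_of_not_contains _ _ (by simpa using hc)]
    rfl

-- modify at a present key keeps the key list
theorem gee_keys_modify_of_mem {κ ν : Type} [BEq κ] [LawfulBEq κ]
    (d : PySem.Dict κ ν) (k : κ) (d0 : ν) (f : ν → ν) (h : k ∈ d.keys) :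
    (d.modify k d0 f).keys = d.keys := by
  rw [PySem.Dict.keys_modify, PySem.Dict.keys_insert_of_contains]
  exact (PySem.Dict.contains_iff_mem_keys _ _).mpr h

-- folds of modify at present keys keep the key list
theorem gee_keys_foldl_modify (E : List String)
    (d : PySem.Dict (List String) (PySem.Dict String String)) (d0 : PySem.Dict String String)
    (g : String → PySem.Dict String String → PySem.Dict String String)
    (h : ∀ e ∈ E, [e] ∈ d.keys) :
    (E.foldl (fun d e => d.modify [e] d0 (g e)) d).keys = d.keys := by
  induction E generalizing d with
  | nil => rfl
  | cons e E ih =>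
    simp only [List.foldl_cons]
    have hk := gee_keys_modify_of_mem d [e] d0 (g e) (h e (List.mem_cons_self))
    rw [ih _ (fun e' he' => hk ▸ h e' (List.mem_cons_of_mem _ he')), hk]

theorem gee_keys_items_foldl (l : List (String × List (String × String))) (E : List String)
    (d : PySem.Dict (List String) (PySem.Dict String String)) (d0 : PySem.Dict String String)
    (h : ∀ e ∈ E, [e] ∈ d.keys) :
    (l.foldl (fun d kv => if kv.1 ∈ E then d.modify [kv.1] d0 (fun v => v.update kv.2) else d) d).keys = d.keys := by
  induction l generalizing d with
  | nil => rfl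
  | cons kv l ih =>
    simp only [List.foldl_cons]
    by_cases hE : kv.1 ∈ E
    · rw [if_pos hE]
      have hk := gee_keys_modify_of_mem d [kv.1] d0 (fun v => v.update kv.2) (h kv.1 hE)
      rw [ih _ (fun e' he' => hk ▸ h e' he'), hk]
    · rw [if_neg hE, ih _ h]


-- the whole pipeline of A, for given sorted elements E and embeddings dict, equals B's single fold
theorem gee_main (E : List String) (emb : PySem.Dict String (List (String × String)))
    (hnd : E.Nodup) (hk : emb.keys.Nodup) :
    (let ext0 : PySem.Dict (List String) (PySem.Dict String String) :=
        E.foldl (fun d el => d.insert [el] PySem.Dict.empty) PySem.Dict.empty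
     let ext1 := if emb.contains "ALL"
        then E.foldl (fun d el => d.modify [el] PySem.Dict.empty (fun v => v.update (emb.getD "ALL" []))) ext0
        else ext0
     let ext2 := if emb.contains "UNARY"
        then E.foldl (fun d el => d.modify [el] PySem.Dict.empty (fun v => v.update (emb.getD "UNARY" []))) ext1
        else ext1
     let ext3 := emb.items.foldl (fun d kv =>
        if kv.1 ∈ E then d.modify [kv.1] PySem.Dict.empty (fun v => v.update kv.2) else d) ext2
     (ext3.items.filter (fun kv => 0 < kv.2.size)).map (fun kv => (kv.1, kv.2.items)))
    = E.foldl (fun acc el =>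
        let spec := ((PySem.Dict.empty.update (emb.getD "ALL" [])).update
            (emb.getD "UNARY" [])).update (emb.getD el [])
        if 0 < spec.size then acc ++ [([el], spec.items)] else acc) [] := by
  dsimp only
  set F : String → PySem.Dict String String := fun el =>
    ((PySem.Dict.empty.update (emb.getD "ALL" [])).update
        (emb.getD "UNARY" [])).update (emb.getD el []) with hF
  have hinj : Function.Injective (fun el : String => [el]) := by
    intro a b h; simpa using h
  have hmapnd : (E.map (fun el => [el])).Nodup := hnd.map hinj
  set ext0 : PySem.Dict (List String) (PySem.Dict String String) :=
    E.foldl (fun d el => d.insert [el] PySem.Dict.empty) PySem.Dict.empty with hext0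
  have h0items : ext0.items = E.map (fun el => ([el], PySem.Dict.empty)) := by
    rw [hext0, PySem.Dict.items_foldl_insert_fresh E (fun el => [el]) (fun _ => PySem.Dict.empty)
      PySem.Dict.empty (fun a _ => PySem.Dict.contains_empty _) hmapnd]
    rfl
  have h0keys : ext0.keys = E.map (fun el => [el]) := by
    simp only [PySem.Dict.keys, h0items, List.map_map]
    rfl
  have h0getD : ∀ el ∈ E, ext0.getD [el] PySem.Dict.empty = PySem.Dict.empty := by
    intro el hel
    exact PySem.Dict.getD_of_mem_items _ (h0items ▸ List.mem_map_of_mem hel)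
      (h0keys ▸ hmapnd) _
  set ext1 := if emb.contains "ALL"
      then E.foldl (fun d el => d.modify [el] PySem.Dict.empty (fun v => v.update (emb.getD "ALL" []))) ext0
      else ext0 with hext1
  have h1keys : ext1.keys = E.map (fun el => [el]) := by
    rw [hext1]
    by_cases hc : emb.contains "ALL" = true
    · rw [if_pos hc, gee_keys_foldl_modify _ _ _ _
        (fun e he => h0keys ▸ List.mem_map_of_mem he), h0keys]
    · rw [if_neg hc, h0keys]
  have h1getD : ∀ el ∈ E, ext1.getD [el] PySem.Dict.empty
      = PySem.Dict.empty.update (emb.getD "ALL" []) := by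
    intro el hel
    rw [hext1]
    by_cases hc : emb.contains "ALL" = true
    · rw [if_pos hc, gee_foldl_modify_getD_mem E el ext0 PySem.Dict.empty
        (fun _ v => v.update (emb.getD "ALL" [])) hel hnd, h0getD el hel]
    · rw [if_neg hc, h0getD el hel,
        PySem.Dict.getD_of_not_contains (k := "ALL") _ _ (Bool.not_eq_true _ ▸ hc)]
      rfl
  set ext2 := if emb.contains "UNARY"
      then E.foldl (fun d el => d.modify [el] PySem.Dict.empty (fun v => v.update (emb.getD "UNARY" []))) ext1
      else ext1 with hext2
  have h2keys : ext2.keys = E.map (fun el => [el]) := by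
    rw [hext2]
    by_cases hc : emb.contains "UNARY" = true
    · rw [if_pos hc, gee_keys_foldl_modify _ _ _ _
        (fun e he => h1keys ▸ List.mem_map_of_mem he), h1keys]
    · rw [if_neg hc, h1keys]
  have h2getD : ∀ el ∈ E, ext2.getD [el] PySem.Dict.empty
      = (PySem.Dict.empty.update (emb.getD "ALL" [])).update (emb.getD "UNARY" []) := by
    intro el hel
    rw [hext2]
    by_cases hc : emb.contains "UNARY" = true
    · rw [if_pos hc, gee_foldl_modify_getD_mem E el ext1 PySem.Dict.empty
        (fun _ v => v.update (emb.getD "UNARY" [])) hel hnd, h1getD el hel]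
    · rw [if_neg hc, h1getD el hel,
        PySem.Dict.getD_of_not_contains (k := "UNARY") _ _ (Bool.not_eq_true _ ▸ hc)]
      rfl
  set ext3 := emb.items.foldl (fun d kv =>
      if kv.1 ∈ E then d.modify [kv.1] PySem.Dict.empty (fun v => v.update kv.2) else d) ext2 with hext3
  have h3keys : ext3.keys = E.map (fun el => [el]) := by
    rw [hext3, gee_keys_items_foldl _ _ _ _
      (fun e he => h2keys ▸ List.mem_map_of_mem he), h2keys]
  have h3getD : ∀ el ∈ E, ext3.getD [el] PySem.Dict.empty = F el := by
    intro el hel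
    rw [hext3, gee_items_foldl_getD _ E el _ _ hel,
      gee_filterfold_eq_update emb el _ hk, h2getD el hel, hF]
  have h3items : ext3.items = E.map (fun el => ([el], F el)) := by
    rw [PySem.Dict.items_eq_map_keys ext3 (h3keys ▸ hmapnd) PySem.Dict.empty, h3keys,
      List.map_map]
    exact List.map_congr_left (fun el hel => by
      simp only [Function.comp_apply]
      rw [h3getD el hel])
  rw [h3items, List.filter_map, List.map_map]
  have hfn : (fun (acc : List (List String × List (String × String))) el =>
        if 0 < (F el).size then acc ++ [([el], (F el).items)] else acc)
      = (fun acc el => if (fun el => decide (0 < (F el).size)) el = true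
          then acc ++ [(fun el => ([el], (F el).items)) el] else acc) := by
    funext acc el
    by_cases h : 0 < (F el).size <;> simp [h]
  rw [hfn, PySem.List.foldl_append_if]
  simp only [List.nil_append]
  congr 1

-- ===== VERDICT (by name: the statement is the Claim_ definition above) =====
theorem generate_embeddings_ext_spec : Claim_equal_generate_embeddings_ext := by
  intro pc _ _
  unfold Spec_generate_embeddings_ext generate_embeddings_ext generate_embeddings_ext_alt
  exact gee_main _ _
    ((PySem.List.sorted_perm _ _ _).symm.nodup (PySem.Dict.nodup_keys_ofList _))
    (PySem.Dict.nodup_keys_ofList _)
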